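-- pv_equiv track=rewrite | github.com/RenLapislazuli/cinemabot | cinemabot/handlers/find.py | select_optimal_link
-- ===== SOURCE A (Python) =====
-- def select_optimal_link(ls: list[str]) -> str:
--     for x in ls:
--         if "rutube" in x:
--             return x
--         if "youtube" in x:
--             return x
--     for x in ls:
--         if "kinogo" not in x:
--             return x
--     return ls[0]
-- ===== SOURCE B (Python) =====
-- def select_optimal_link(ls: list[str]) -> str:
--     def priority(x: str) -> int:
--         if "rutube" in x or "youtube" in x:
--             return 0
--         if "kinogo" not in x:
--             return 1
--         return 2
--     return min(ls, key=priority)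
-- ===== Notes on version B (the rewrite author's own statement) =====
-- stated objective: alternative
-- what changed: Replaced A's two sequential scans (first for rutube/youtube, then a second whole-list scan for a non-kinogo link, else ls[0]) by an argmin over a 3-level priority key: min(ls, key=priority) returns the first element of minimal priority in one pass.
import Mathlib
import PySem

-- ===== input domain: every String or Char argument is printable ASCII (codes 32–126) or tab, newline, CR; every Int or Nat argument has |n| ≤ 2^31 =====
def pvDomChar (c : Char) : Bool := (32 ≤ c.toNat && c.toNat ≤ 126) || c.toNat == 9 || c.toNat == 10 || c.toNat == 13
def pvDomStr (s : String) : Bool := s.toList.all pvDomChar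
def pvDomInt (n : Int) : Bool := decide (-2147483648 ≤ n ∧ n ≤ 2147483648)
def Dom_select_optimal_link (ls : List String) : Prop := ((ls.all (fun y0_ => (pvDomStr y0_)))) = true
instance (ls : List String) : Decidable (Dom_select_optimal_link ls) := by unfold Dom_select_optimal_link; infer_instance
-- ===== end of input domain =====

-- B replaces A's two staged scans by an argmin over a 3-level priority key (min with key, first minimal element); objective: alternative (same cost).

-- ===== PORT A =====
-- first loop of A: return the first x containing "rutube" or (checked second) "youtube"
def pvScan1 : List String → Option String
  | [] => none
  | x :: xs =>
    if PySem.Str.isIn "rutube" x then some x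
    else if PySem.Str.isIn "youtube" x then some x
    else pvScan1 xs

-- second loop of A: return the first x not containing "kinogo"
def pvScan2 : List String → Option String
  | [] => none
  | x :: xs =>
    if ¬ (PySem.Str.isIn "kinogo" x) then some x
    else pvScan2 xs

def select_optimal_link (ls : List String) : String :=
  match pvScan1 ls with
  | some x => x
  | none =>
    match pvScan2 ls with
    | some x => x
    | none => ls.headD ""   -- ls[0]; Pre_ excludes ls = [], where Python raises IndexError

-- ===== PORT B =====
-- priority(x): 0 for rutube/youtube links, 1 for non-kinogo links, 2 otherwise
def pvPriority (x : String) : Int :=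
  if PySem.Str.isIn "rutube" x || PySem.Str.isIn "youtube" x then 0
  else if ¬ (PySem.Str.isIn "kinogo" x) then 1
  else 2

-- min(ls, key=priority); min? is none only on [], which Pre_ excludes (Python raises ValueError there)
def select_optimal_link_alt (ls : List String) : String :=
  (PySem.List.min? ls pvPriority).getD ""

-- ===== PRECONDITION & SPEC =====
-- Pre_ excludes only the empty list, on which both Pythons raise (A: IndexError, B: ValueError).
def Pre_select_optimal_link (ls : List String) : Prop := ls ≠ []
instance (ls : List String) : Decidable (Pre_select_optimal_link ls) := by unfold Pre_select_optimal_link; infer_instance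
def pvWitness_select_optimal_link : List String := ["https://rutube.ru/a"]

def Spec_select_optimal_link (ls : List String) (out : String) : Prop := out = select_optimal_link_alt ls
instance (ls : List String) (out : String) : Decidable (Spec_select_optimal_link ls out) := by unfold Spec_select_optimal_link; infer_instance

-- ===== CLAIM (what is proved, stated in full; the proofs are below) =====
def Claim_equal_select_optimal_link : Prop := ∀ (ls : List String), Dom_select_optimal_link ls → Pre_select_optimal_link ls → Spec_select_optimal_link ls (select_optimal_link ls)

-- ===== LEMMAS AND PROOFS =====
-- A's value on the nonempty list m :: xs, as a function of the head and tail.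
def pvSelA (m : String) (xs : List String) : String :=
  match pvScan1 (m :: xs) with
  | some y => y
  | none =>
    match pvScan2 (m :: xs) with
    | some y => y
    | none => m

theorem pvSelA_nil (m : String) : pvSelA m [] = m := by
  unfold pvSelA pvScan1 pvScan2
  split_ifs <;> rfl

-- The argmin step: absorbing the next element into the running minimum matches A's selection.
theorem pvSelA_cons (m x : String) (xs : List String) :
    pvSelA m (x :: xs) = if pvPriority x < pvPriority m then pvSelA x xs else pvSelA m xs := by
  by_cases hmr : PySem.Str.isIn "rutube" m = true <;>
  by_cases hmy : PySem.Str.isIn "youtube" m = true <;>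
  by_cases hmk : PySem.Str.isIn "kinogo" m = true <;>
  by_cases hxr : PySem.Str.isIn "rutube" x = true <;>
  by_cases hxy : PySem.Str.isIn "youtube" x = true <;>
  by_cases hxk : PySem.Str.isIn "kinogo" x = true <;>
  · simp only [pvSelA, pvScan1, pvScan2, pvPriority, hmr, hmy, hmk, hxr, hxy, hxk]
    norm_num
    try (cases h1 : pvScan1 xs <;> cases h2 : pvScan2 xs <;> simp)

-- The foldl inside min?, started from a some accumulator, computes A's selection.
theorem pvFold_some (xs : List String) : ∀ (m : String),
    List.foldl
      (fun acc x =>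
        match acc with
        | none => some x
        | some mm => if pvPriority x < pvPriority mm then some x else some mm)
      (some m) xs = some (pvSelA m xs) := by
  induction xs with
  | nil => intro m; simp [pvSelA_nil]
  | cons x xs ih =>
    intro m
    rw [List.foldl_cons, pvSelA_cons]
    by_cases h : pvPriority x < pvPriority m <;> simp [h, ih]

-- ===== VERDICT (by name: the statement is the Claim_ definition above) =====
theorem select_optimal_link_spec : Claim_equal_select_optimal_link := by
  intro ls _ hpre
  unfold Spec_select_optimal_link select_optimal_link_alt
  cases ls with
  | nil => exact absurd rfl hpre
  | cons m xs =>
    show select_optimal_link (m :: xs) = (PySem.List.min? (m :: xs) pvPriority).getD ""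
    have hmin : PySem.List.min? (m :: xs) pvPriority =
        List.foldl
          (fun acc x =>
            match acc with
            | none => some x
            | some mm => if pvPriority x < pvPriority mm then some x else some mm)
          (some m) xs := by
      unfold PySem.List.min?
      rw [List.foldl_cons]
      congr 1
      funext acc x
      cases acc <;> rfl
    rw [hmin, pvFold_some]
    simp only [Option.getD_some]
    unfold select_optimal_link pvSelA
    cases h1 : pvScan1 (m :: xs) <;> cases h2 : pvScan2 (m :: xs) <;> simp
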